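-- pv_equiv track=rewrite | github.com/albarami/thematics | analysis/CASE_D3/_working/build_case_d3_segment_candidates.py | apply_source_question_breakpoints
-- ===== SOURCE A (Python) =====
-- SOURCE_QUESTION_BREAKPOINTS: dict[str, list[tuple[int, str]]] = {
--     "HWAD1AR.docx": [(3, "Q1"), (242, "Q4"), (258, "Q5"), (343, "Q6"), (365, "Q7")],
--     "HWAD3AR.docx": [(2, "Q1"), (79, "Q3"), (134, "Q4"), (219, "Q5"), (273, "Q6"), (309, "Q7")],
--     "HWAD4AR.docx": [(1, "Q1"), (121, "Q2"), (202, "Q3"), (266, "Q4"), (385, "Q5"), (514, "Q6"), (598, "Q7")],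
--     "HWAD6AR.docx": [(22, "Q1"), (30, "Q2"), (45, "Q3"), (68, "Q4"), (114, "Q5"), (159, "Q6"), (177, "Q7")],
--     "HWAD10AR.docx": [(29, "Q1"), (61, "Q2"), (140, "Q3"), (226, "Q4"), (349, "Q5"), (425, "Q7")],
-- }
--
-- def apply_source_question_breakpoints(source_file: str, paragraph_number: int, current_question: str | None) -> str | None:
--     breakpoints = SOURCE_QUESTION_BREAKPOINTS.get(source_file, [])
--     detected = current_question
--     for start_paragraph, question_id in breakpoints:
--         if paragraph_number >= start_paragraph:
--             detected = question_id
--         else: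
--             break
--     return detected
-- ===== SOURCE B (Python) =====
-- def apply_source_question_breakpoints(source_file: str, paragraph_number: int, current_question: str | None) -> str | None:
--     # Unrolled decision chain: per file, test thresholds from highest down; no table, no loop.
--     if source_file == "HWAD1AR.docx":
--         if paragraph_number >= 365:
--             return "Q7"
--         if paragraph_number >= 343:
--             return "Q6"
--         if paragraph_number >= 258:
--             return "Q5"
--         if paragraph_number >= 242:
--             return "Q4"
--         if paragraph_number >= 3:
--             return "Q1"
--     elif source_file == "HWAD3AR.docx":
--         if paragraph_number >= 309:
--             return "Q7"
--         if paragraph_number >= 273: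
--             return "Q6"
--         if paragraph_number >= 219:
--             return "Q5"
--         if paragraph_number >= 134:
--             return "Q4"
--         if paragraph_number >= 79:
--             return "Q3"
--         if paragraph_number >= 2:
--             return "Q1"
--     elif source_file == "HWAD4AR.docx":
--         if paragraph_number >= 598:
--             return "Q7"
--         if paragraph_number >= 514:
--             return "Q6"
--         if paragraph_number >= 385:
--             return "Q5"
--         if paragraph_number >= 266:
--             return "Q4"
--         if paragraph_number >= 202:
--             return "Q3"
--         if paragraph_number >= 121:
--             return "Q2"
--         if paragraph_number >= 1:
--             return "Q1"
--     elif source_file == "HWAD6AR.docx":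
--         if paragraph_number >= 177:
--             return "Q7"
--         if paragraph_number >= 159:
--             return "Q6"
--         if paragraph_number >= 114:
--             return "Q5"
--         if paragraph_number >= 68:
--             return "Q4"
--         if paragraph_number >= 45:
--             return "Q3"
--         if paragraph_number >= 30:
--             return "Q2"
--         if paragraph_number >= 22:
--             return "Q1"
--     elif source_file == "HWAD10AR.docx":
--         if paragraph_number >= 425:
--             return "Q7"
--         if paragraph_number >= 349:
--             return "Q5"
--         if paragraph_number >= 226:
--             return "Q4"
--         if paragraph_number >= 140:
--             return "Q3"
--         if paragraph_number >= 61: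
--             return "Q2"
--         if paragraph_number >= 29:
--             return "Q1"
--     return current_question
-- ===== Notes on version B (the rewrite author's own statement) =====
-- stated objective: alternative
-- what changed: Replaces the table lookup plus early-break linear scan with a fully unrolled decision chain: one branch per source file, thresholds tested from highest to lowest, returning at the first match; no dict, no list, no loop.
import Mathlib
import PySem

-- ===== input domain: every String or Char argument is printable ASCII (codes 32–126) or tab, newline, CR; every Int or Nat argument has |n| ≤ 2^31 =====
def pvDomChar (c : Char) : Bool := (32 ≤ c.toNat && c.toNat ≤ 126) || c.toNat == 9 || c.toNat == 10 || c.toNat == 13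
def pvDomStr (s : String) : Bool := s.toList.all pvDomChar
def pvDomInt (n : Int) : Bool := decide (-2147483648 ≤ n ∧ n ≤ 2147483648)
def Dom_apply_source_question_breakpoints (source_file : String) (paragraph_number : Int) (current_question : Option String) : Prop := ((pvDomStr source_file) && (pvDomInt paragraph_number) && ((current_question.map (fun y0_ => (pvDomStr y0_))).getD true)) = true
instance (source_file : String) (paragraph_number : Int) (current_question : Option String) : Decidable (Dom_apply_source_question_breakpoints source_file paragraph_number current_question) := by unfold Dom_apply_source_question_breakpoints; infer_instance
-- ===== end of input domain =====

-- B replaces A's dict lookup + early-break scan by a fully unrolled branch chain (thresholds high→low); alternative decomposition, same results.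

-- ===== PORT A =====
def pvTable : PySem.Dict String (List (Int × String)) :=
  PySem.Dict.mk
  [("HWAD1AR.docx", [(3, "Q1"), (242, "Q4"), (258, "Q5"), (343, "Q6"), (365, "Q7")]),
   ("HWAD3AR.docx", [(2, "Q1"), (79, "Q3"), (134, "Q4"), (219, "Q5"), (273, "Q6"), (309, "Q7")]),
   ("HWAD4AR.docx", [(1, "Q1"), (121, "Q2"), (202, "Q3"), (266, "Q4"), (385, "Q5"), (514, "Q6"), (598, "Q7")]),
   ("HWAD6AR.docx", [(22, "Q1"), (30, "Q2"), (45, "Q3"), (68, "Q4"), (114, "Q5"), (159, "Q6"), (177, "Q7")]),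
   ("HWAD10AR.docx", [(29, "Q1"), (61, "Q2"), (140, "Q3"), (226, "Q4"), (349, "Q5"), (425, "Q7")])]

-- A's for-loop with break: fold over the list carrying 'detected', stopping at the first start > paragraph_number
def pvLoopA (bps : List (Int × String)) (paragraph_number : Int) (detected : Option String) : Option String :=
  match bps with
  | [] => detected
  | (start_paragraph, question_id) :: rest =>
      if paragraph_number ≥ start_paragraph then pvLoopA rest paragraph_number (some question_id)
      else detected

def apply_source_question_breakpoints (source_file : String) (paragraph_number : Int) (current_question : Option String) : Option String :=
  let breakpoints := (pvTable.get? source_file).getD []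
  pvLoopA breakpoints paragraph_number current_question

-- ===== PORT B =====
-- Source B's unrolled decision chain, transcribed branch for branch (per file; thresholds from highest down)
def apply_source_question_breakpoints_alt (source_file : String) (paragraph_number : Int) (current_question : Option String) : Option String :=
  if source_file = "HWAD1AR.docx" then
    if paragraph_number ≥ 365 then some "Q7"
      else if paragraph_number ≥ 343 then some "Q6"
      else if paragraph_number ≥ 258 then some "Q5"
      else if paragraph_number ≥ 242 then some "Q4"
      else if paragraph_number ≥ 3 then some "Q1"
      else current_question
  else if source_file = "HWAD3AR.docx" then
    if paragraph_number ≥ 309 then some "Q7"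
      else if paragraph_number ≥ 273 then some "Q6"
      else if paragraph_number ≥ 219 then some "Q5"
      else if paragraph_number ≥ 134 then some "Q4"
      else if paragraph_number ≥ 79 then some "Q3"
      else if paragraph_number ≥ 2 then some "Q1"
      else current_question
  else if source_file = "HWAD4AR.docx" then
    if paragraph_number ≥ 598 then some "Q7"
      else if paragraph_number ≥ 514 then some "Q6"
      else if paragraph_number ≥ 385 then some "Q5"
      else if paragraph_number ≥ 266 then some "Q4"
      else if paragraph_number ≥ 202 then some "Q3"
      else if paragraph_number ≥ 121 then some "Q2"
      else if paragraph_number ≥ 1 then some "Q1"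
      else current_question
  else if source_file = "HWAD6AR.docx" then
    if paragraph_number ≥ 177 then some "Q7"
      else if paragraph_number ≥ 159 then some "Q6"
      else if paragraph_number ≥ 114 then some "Q5"
      else if paragraph_number ≥ 68 then some "Q4"
      else if paragraph_number ≥ 45 then some "Q3"
      else if paragraph_number ≥ 30 then some "Q2"
      else if paragraph_number ≥ 22 then some "Q1"
      else current_question
  else if source_file = "HWAD10AR.docx" then
    if paragraph_number ≥ 425 then some "Q7"
      else if paragraph_number ≥ 349 then some "Q5"
      else if paragraph_number ≥ 226 then some "Q4"
      else if paragraph_number ≥ 140 then some "Q3"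
      else if paragraph_number ≥ 61 then some "Q2"
      else if paragraph_number ≥ 29 then some "Q1"
      else current_question
  else current_question

-- ===== PRECONDITION & SPEC =====
def Spec_apply_source_question_breakpoints (source_file : String) (paragraph_number : Int) (current_question : Option String) (out : Option String) : Prop := out = apply_source_question_breakpoints_alt source_file paragraph_number current_question
instance (source_file : String) (paragraph_number : Int) (current_question : Option String) (out : Option String) : Decidable (Spec_apply_source_question_breakpoints source_file paragraph_number current_question out) := by unfold Spec_apply_source_question_breakpoints; infer_instance

-- ===== CLAIM =====
def Claim_equal_apply_source_question_breakpoints : Prop := ∀ (source_file : String) (paragraph_number : Int) (current_question : Option String), Dom_apply_source_question_breakpoints source_file paragraph_number current_question → Spec_apply_source_question_breakpoints source_file paragraph_number current_question (apply_source_question_breakpoints source_file paragraph_number current_question)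

-- ===== LEMMAS AND PROOFS =====
set_option maxHeartbeats 1000000 in
theorem apply_source_question_breakpoints_spec : Claim_equal_apply_source_question_breakpoints := by
  intro source_file paragraph_number current_question _
  unfold Spec_apply_source_question_breakpoints
  simp only [apply_source_question_breakpoints, apply_source_question_breakpoints_alt]
  by_cases h1 : source_file = "HWAD1AR.docx"
  · subst h1
    norm_num
    rw [show (pvTable.get? "HWAD1AR.docx").getD [] = ([(3, "Q1"), (242, "Q4"), (258, "Q5"), (343, "Q6"), (365, "Q7")] : List (Int × String)) from rfl]
    simp only [pvLoopA]
    split_ifs <;> first | rfl | omega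
  by_cases h2 : source_file = "HWAD3AR.docx"
  · subst h2
    norm_num
    rw [show (pvTable.get? "HWAD3AR.docx").getD [] = ([(2, "Q1"), (79, "Q3"), (134, "Q4"), (219, "Q5"), (273, "Q6"), (309, "Q7")] : List (Int × String)) from rfl]
    simp only [pvLoopA]
    split_ifs <;> first | rfl | omega
  by_cases h3 : source_file = "HWAD4AR.docx"
  · subst h3
    norm_num
    rw [show (pvTable.get? "HWAD4AR.docx").getD [] = ([(1, "Q1"), (121, "Q2"), (202, "Q3"), (266, "Q4"), (385, "Q5"), (514, "Q6"), (598, "Q7")] : List (Int × String)) from rfl]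
    simp only [pvLoopA]
    split_ifs <;> first | rfl | omega
  by_cases h4 : source_file = "HWAD6AR.docx"
  · subst h4
    norm_num
    rw [show (pvTable.get? "HWAD6AR.docx").getD [] = ([(22, "Q1"), (30, "Q2"), (45, "Q3"), (68, "Q4"), (114, "Q5"), (159, "Q6"), (177, "Q7")] : List (Int × String)) from rfl]
    simp only [pvLoopA]
    split_ifs <;> first | rfl | omega
  by_cases h5 : source_file = "HWAD10AR.docx"
  · subst h5
    norm_num
    rw [show (pvTable.get? "HWAD10AR.docx").getD [] = ([(29, "Q1"), (61, "Q2"), (140, "Q3"), (226, "Q4"), (349, "Q5"), (425, "Q7")] : List (Int × String)) from rfl]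
    simp only [pvLoopA]
    split_ifs <;> first | rfl | omega
  · simp [pvTable, PySem.Dict.get?, pvLoopA,
      h1, h2, h3, h4, h5, Ne.symm h1, Ne.symm h2, Ne.symm h3, Ne.symm h4, Ne.symm h5]
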